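-- pv_equiv track=rewrite | github.com/NicolaasZA/adventofcode | src/2024/02/p2.py | analyze_report
-- ===== SOURCE A (Python) =====
-- def analyze_report(report: list[int]) -> int:
--     mode = None
--     for idx in range(len(report) - 1):
--         l, r = report[idx], report[idx + 1]
--         if abs(l - r) > 3 or l == r:
--             return 0
--         elif l < r:
--             if mode == 'up':
--                 return 0
--             mode = 'down'
--         elif l > r:
--             if mode == 'down':
--                 return 0
--             mode = 'up'
--     return 1
-- ===== SOURCE B (Python) =====
-- def analyze_report(report: list[int]) -> int:
--     diffs = [b - a for a, b in zip(report, report[1:])]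
--     if all(1 <= d <= 3 for d in diffs) or all(-3 <= d <= -1 for d in diffs):
--         return 1
--     return 0
-- ===== Notes on version B (the rewrite author's own statement) =====
-- stated objective: simpler
-- what changed: Replaced the per-element mode state machine with early returns by one materialized list of consecutive differences followed by two whole-list range predicates.
import Mathlib
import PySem

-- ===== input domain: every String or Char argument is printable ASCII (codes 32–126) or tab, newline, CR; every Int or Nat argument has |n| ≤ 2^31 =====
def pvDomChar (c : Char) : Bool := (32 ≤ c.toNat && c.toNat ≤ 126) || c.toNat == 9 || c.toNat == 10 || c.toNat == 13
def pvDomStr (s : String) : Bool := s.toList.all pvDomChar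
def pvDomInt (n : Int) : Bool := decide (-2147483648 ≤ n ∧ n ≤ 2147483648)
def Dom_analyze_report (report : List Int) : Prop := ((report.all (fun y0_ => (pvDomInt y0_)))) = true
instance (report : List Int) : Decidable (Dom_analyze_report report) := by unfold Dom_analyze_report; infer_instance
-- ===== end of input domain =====

-- B replaces A's per-step mode state machine (with early returns) by one diff list
-- and two independent whole-list range checks; objective: simpler.

-- ===== PORT A =====
-- the loop over idx: each iteration reads the consecutive pair (l, r) = (report[idx], report[idx+1]);
-- ported as recursion over the consecutive pairs with the same `mode` state and the same branch order,
-- an early `return` becoming the returned value.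
def analyzeGoA : List Int → Option String → Int
  | l :: r :: rest, mode =>
    if (l - r).natAbs > 3 ∨ l = r then 0
    else if l < r then
      (if mode = some "up" then 0 else analyzeGoA (r :: rest) (some "down"))
    else if l > r then
      (if mode = some "down" then 0 else analyzeGoA (r :: rest) (some "up"))
    else analyzeGoA (r :: rest) mode
  | _, _ => 1

def analyze_report (report : List Int) : Int := analyzeGoA report none

-- ===== PORT B =====
def analyze_report_alt (report : List Int) : Int :=
  let diffs := (report.zip (report.drop 1)).map (fun p => p.2 - p.1)
  if diffs.all (fun d => decide (1 ≤ d ∧ d ≤ 3)) || diffs.all (fun d => decide (-3 ≤ d ∧ d ≤ -1))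
  then 1 else 0

-- ===== PRECONDITION & SPEC =====
def Spec_analyze_report (report : List Int) (out : Int) : Prop := out = analyze_report_alt report
instance (report : List Int) (out : Int) : Decidable (Spec_analyze_report report out) := by unfold Spec_analyze_report; infer_instance

-- ===== CLAIM (what is proved, stated in full; the proofs are below) =====
def Claim_equal_analyze_report : Prop := ∀ (report : List Int), Dom_analyze_report report → Spec_analyze_report report (analyze_report report)

-- ===== LEMMAS AND PROOFS =====

-- all consecutive diffs in [1,3] / in [-3,-1], as structural recursions
def upOk : List Int → Bool
  | l :: r :: rest => (decide (1 ≤ r - l ∧ r - l ≤ 3)) && upOk (r :: rest)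
  | _ => true

def downOk : List Int → Bool
  | l :: r :: rest => (decide (-3 ≤ r - l ∧ r - l ≤ -1)) && downOk (r :: rest)
  | _ => true

lemma goA_char : ∀ xs : List Int,
    analyzeGoA xs none = (if upOk xs || downOk xs then 1 else 0)
    ∧ analyzeGoA xs (some "down") = (if upOk xs then 1 else 0)
    ∧ analyzeGoA xs (some "up") = (if downOk xs then 1 else 0) := by
  intro xs
  induction xs with
  | nil => simp [analyzeGoA, upOk, downOk]
  | cons l tail ih =>
    cases tail with
    | nil => simp [analyzeGoA, upOk, downOk]
    | cons r rest =>
      obtain ⟨ih1, ih2, ih3⟩ := ih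
      by_cases hbad : (l - r).natAbs > 3 ∨ l = r
      · have hu : upOk (l :: r :: rest) = false := by
          simp only [upOk, Bool.and_eq_false_iff]; left; simp; omega
        have hd : downOk (l :: r :: rest) = false := by
          simp only [downOk, Bool.and_eq_false_iff]; left; simp; omega
        simp [analyzeGoA, hbad, hu, hd]
      · rw [not_or] at hbad
        obtain ⟨hb1, hb2⟩ := hbad
        by_cases hlt : l < r
        · have h1 : 1 ≤ r - l ∧ r - l ≤ 3 := by omega
          have hu : upOk (l :: r :: rest) = upOk (r :: rest) := by
            simp [upOk, h1]
          have hd : downOk (l :: r :: rest) = false := by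
            simp only [downOk, Bool.and_eq_false_iff]; left; simp; omega
          simp [analyzeGoA, hb1, hb2, hlt, hu, hd, ih2]
        · have hgt : l > r := by omega
          have h1 : -3 ≤ r - l ∧ r - l ≤ -1 := by omega
          have hd : downOk (l :: r :: rest) = downOk (r :: rest) := by
            simp [downOk, h1]
          have hu : upOk (l :: r :: rest) = false := by
            simp only [upOk, Bool.and_eq_false_iff]; left; simp; omega
          simp [analyzeGoA, hb1, hb2, hlt, hgt, hu, hd, ih3]

lemma alt_up : ∀ xs : List Int,
    ((xs.zip (xs.drop 1)).map (fun p => p.2 - p.1)).all (fun d => decide (1 ≤ d ∧ d ≤ 3)) = upOk xs := by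
  intro xs
  induction xs with
  | nil => simp [upOk]
  | cons l tail ih =>
    cases tail with
    | nil => simp [upOk]
    | cons r rest =>
      simp only [upOk, List.drop_succ_cons, List.drop_zero, List.zip_cons_cons,
        List.map_cons, List.all_cons]
      simp only [List.drop_succ_cons, List.drop_zero] at ih
      rw [ih]

lemma alt_down : ∀ xs : List Int,
    ((xs.zip (xs.drop 1)).map (fun p => p.2 - p.1)).all (fun d => decide (-3 ≤ d ∧ d ≤ -1)) = downOk xs := by
  intro xs
  induction xs with
  | nil => simp [downOk]
  | cons l tail ih =>
    cases tail with
    | nil => simp [downOk]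
    | cons r rest =>
      simp only [downOk, List.drop_succ_cons, List.drop_zero, List.zip_cons_cons,
        List.map_cons, List.all_cons]
      simp only [List.drop_succ_cons, List.drop_zero] at ih
      rw [ih]

-- ===== VERDICT (by name: the statement is the Claim_ definition above) =====
theorem analyze_report_spec : Claim_equal_analyze_report := by
  intro report _
  unfold Spec_analyze_report analyze_report
  rw [(goA_char report).1, ← alt_up report, ← alt_down report]
  rfl
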